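-- pv_equiv track=rewrite | github.com/peninha/Dekatrian | date_conversion.py | Dek2Greg
-- ===== SOURCE A (Python) =====
-- def CheckLeapYear(dekYear):
--     if (dekYear % 4 == 0) and (dekYear % 100 != 0 or dekYear % 400 == 0):
--         return 1
--     else:
--         return 0
--
-- def YearDayOnDekaDate(dekDay, dekMonth, dekYear):
--     """
--     Returns the day of the year of a Dekatrian date.
--     Achronian is the day 1.
--     Sinchronian is day 2 when it exists.
--     """
--     if dekMonth == 0:
--         return dekDay
--     else:
--         return (CheckLeapYear(dekYear)) + 1 + (dekMonth-1)*28 + dekDay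
--
-- def Dek2Greg(dekDay, dekMonth, dekYear):
--     """
--     Returns a Dekatrian date from a Gregorian date.
--     """
--     YearDay = YearDayOnDekaDate(dekDay, dekMonth, dekYear)
--     Jan = 31
--     Fev = 28 + CheckLeapYear(dekYear)
--     Mar = 31
--     Apr = 30
--     Mai = 31
--     Jun = 30
--     Jul = 31
--     Ago = 31
--     Set = 30
--     Out = 31
--     Nov = 30
--     Dez = 31
--     Meses = (Jan, Fev, Mar, Apr, Mai, Jun, Jul, Ago, Set, Out, Nov, Dez)
--     for mes, dias in enumerate(Meses, start=1):
--         if YearDay > dias: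
--             YearDay -= dias
--         else:
--             break
--     return (YearDay, mes, dekYear)
-- ===== SOURCE B (Python) =====
-- def Dek2Greg(dekDay, dekMonth, dekYear):
--     leap = 1 if dekYear % 4 == 0 and (dekYear % 100 != 0 or dekYear % 400 == 0) else 0
--     if dekMonth == 0:
--         yd = dekDay
--     else:
--         yd = leap + 1 + (dekMonth - 1) * 28 + dekDay
--     cum = [0]
--     for d in (31, 28 + leap, 31, 30, 31, 30, 31, 31, 30, 31, 30, 31):
--         cum.append(cum[-1] + d)
--     for mes in range(1, 13):
--         if yd <= cum[mes]:
--             return (yd - cum[mes - 1], mes, dekYear)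
--     return (yd - cum[12], 12, dekYear)
-- ===== Notes on version B (the rewrite author's own statement) =====
-- stated objective: alternative
-- what changed: B replaces A's running-subtraction loop over month lengths with a precomputed cumulative prefix array of year-day boundaries and a scan for the first month whose boundary covers the year-day, subtracting once at the end (same overflow behaviour: month 12 with all twelve lengths subtracted).
import Mathlib
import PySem

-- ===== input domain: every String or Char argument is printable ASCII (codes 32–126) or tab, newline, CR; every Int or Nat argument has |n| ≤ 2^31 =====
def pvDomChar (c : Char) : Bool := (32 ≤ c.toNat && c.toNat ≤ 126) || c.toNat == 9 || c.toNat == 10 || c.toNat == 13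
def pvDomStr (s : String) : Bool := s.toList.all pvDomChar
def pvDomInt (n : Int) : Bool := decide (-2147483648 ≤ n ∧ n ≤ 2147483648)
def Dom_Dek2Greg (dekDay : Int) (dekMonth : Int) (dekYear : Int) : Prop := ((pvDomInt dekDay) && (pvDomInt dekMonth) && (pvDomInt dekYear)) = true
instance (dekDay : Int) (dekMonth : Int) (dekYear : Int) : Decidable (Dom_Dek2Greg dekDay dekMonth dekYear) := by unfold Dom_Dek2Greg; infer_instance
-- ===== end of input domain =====

-- B replaces A's running-subtraction month loop with a cumulative prefix array of
-- year-day boundaries and a first-fit scan (alternative decomposition, same cost).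


-- ===== PORT A =====
def CheckLeapYear (dekYear : Int) : Int :=
  if dekYear % 4 == 0 && (dekYear % 100 != 0 || dekYear % 400 == 0) then 1 else 0

def YearDayOnDekaDate (dekDay : Int) (dekMonth : Int) (dekYear : Int) : Int :=
  if dekMonth == 0 then dekDay
  else CheckLeapYear dekYear + 1 + (dekMonth - 1) * 28 + dekDay

-- the for/break loop over enumerate(Meses, start=1): state is (YearDay, mes)
def dekLoopA (yd : Int) (mes : Int) : List (Int × Int) → Int × Int
  | [] => (yd, mes)
  | (m, dias) :: rest => if yd > dias then dekLoopA (yd - dias) m rest else (yd, m)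

def Dek2Greg (dekDay : Int) (dekMonth : Int) (dekYear : Int) : Int × Int × Int :=
  let YearDay := YearDayOnDekaDate dekDay dekMonth dekYear
  let Fev := 28 + CheckLeapYear dekYear
  let Meses : List (Int × Int) :=
    [(1, 31), (2, Fev), (3, 31), (4, 30), (5, 31), (6, 30),
     (7, 31), (8, 31), (9, 30), (10, 31), (11, 30), (12, 31)]
  let r := dekLoopA YearDay 0 Meses
  (r.1, r.2, dekYear)

-- ===== PORT B =====
-- scan for the first mes with yd ≤ cum[mes]; prev carries cum[mes-1]
def dekScanB (yd : Int) (mes : Int) (prev : Int) : List Int → Int × Int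
  | [] => (yd - prev, 12)
  | c :: rest => if yd ≤ c then (yd - prev, mes) else dekScanB yd (mes + 1) c rest

def Dek2Greg_alt (dekDay : Int) (dekMonth : Int) (dekYear : Int) : Int × Int × Int :=
  let leap : Int :=
    if dekYear % 4 == 0 && (dekYear % 100 != 0 || dekYear % 400 == 0) then 1 else 0
  let yd := if dekMonth == 0 then dekDay else leap + 1 + (dekMonth - 1) * 28 + dekDay
  let cum := ([(31 : Int), 28 + leap, 31, 30, 31, 30, 31, 31, 30, 31, 30, 31].foldl
      (fun acc d => acc ++ [acc.getLastD 0 + d]) [0]).drop 1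
  let r := dekScanB yd 1 0 cum
  (r.1, r.2, dekYear)

-- ===== PRECONDITION & SPEC =====
def Spec_Dek2Greg (dekDay : Int) (dekMonth : Int) (dekYear : Int) (out : Int × Int × Int) : Prop := out = Dek2Greg_alt dekDay dekMonth dekYear
instance (dekDay : Int) (dekMonth : Int) (dekYear : Int) (out : Int × Int × Int) : Decidable (Spec_Dek2Greg dekDay dekMonth dekYear out) := by unfold Spec_Dek2Greg; infer_instance

-- ===== CLAIM (what is proved, stated in full; the proofs are below) =====
def Claim_equal_Dek2Greg : Prop := ∀ (dekDay : Int) (dekMonth : Int) (dekYear : Int), Dom_Dek2Greg dekDay dekMonth dekYear → Spec_Dek2Greg dekDay dekMonth dekYear (Dek2Greg dekDay dekMonth dekYear)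

-- ===== LEMMAS AND PROOFS =====
-- proof-only helpers: the month/length pairs from index k, and the running
-- prefix sums from prev, of a list of month lengths
def dekPairs (k : Int) : List Int → List (Int × Int)
  | [] => []
  | d :: r => (k, d) :: dekPairs (k + 1) r

def dekCums (prev : Int) : List Int → List Int
  | [] => []
  | d :: r => (prev + d) :: dekCums (prev + d) r

-- the break-loop over (month, length) pairs equals the boundary scan over the
-- prefix sums, for any tail of the month table ending at month 12
theorem dekGen (ds : List Int) : ∀ (yd prev k mes0 : Int),
    k + ds.length = 13 → mes0 = k - 1 →
    dekLoopA (yd - prev) mes0 (dekPairs k ds) = dekScanB yd k prev (dekCums prev ds) := by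
  induction ds with
  | nil =>
    intro yd prev k mes0 hk hm
    simp only [List.length_nil] at hk
    have h12 : mes0 = (12 : Int) := by omega
    simp only [dekPairs, dekCums, dekLoopA, dekScanB, h12]
  | cons d r ih =>
    intro yd prev k mes0 hk hm
    simp only [List.length_cons] at hk
    simp only [dekPairs, dekCums, dekLoopA, dekScanB]
    by_cases h : yd - prev > d
    · rw [if_pos h, if_neg (by omega)]
      have : yd - prev - d = yd - (prev + d) := by ring
      rw [this]
      exact ih yd (prev + d) (k + 1) k (by omega) (by omega)
    · rw [if_neg h, if_pos (by omega)]

theorem dekCore (leap yd : Int) :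
    dekLoopA yd 0 [(1, 31), (2, 28 + leap), (3, 31), (4, 30), (5, 31), (6, 30),
       (7, 31), (8, 31), (9, 30), (10, 31), (11, 30), (12, 31)]
    = dekScanB yd 1 0 (([(31 : Int), 28 + leap, 31, 30, 31, 30, 31, 31, 30, 31, 30, 31].foldl
        (fun acc d => acc ++ [acc.getLastD 0 + d]) [0]).drop 1) := by
  have hp : dekPairs 1 [(31 : Int), 28 + leap, 31, 30, 31, 30, 31, 31, 30, 31, 30, 31]
      = [((1 : Int), (31 : Int)), (2, 28 + leap), (3, 31), (4, 30), (5, 31), (6, 30),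
         (7, 31), (8, 31), (9, 30), (10, 31), (11, 30), (12, 31)] := by
    norm_num [dekPairs]
  have hc : dekCums 0 [(31 : Int), 28 + leap, 31, 30, 31, 30, 31, 31, 30, 31, 30, 31]
      = (([(31 : Int), 28 + leap, 31, 30, 31, 30, 31, 31, 30, 31, 30, 31].foldl
          (fun acc d => acc ++ [acc.getLastD 0 + d]) [0]).drop 1) := by
    norm_num [dekCums, List.foldl, List.getLastD, List.getLast?]
  have := dekGen [(31 : Int), 28 + leap, 31, 30, 31, 30, 31, 31, 30, 31, 30, 31] yd 0 1 0
    (by norm_num) (by norm_num)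
  rw [hp, hc] at this
  simpa using this

theorem Dek2Greg_eq_alt (dekDay dekMonth dekYear : Int) :
    Dek2Greg dekDay dekMonth dekYear = Dek2Greg_alt dekDay dekMonth dekYear := by
  unfold Dek2Greg Dek2Greg_alt YearDayOnDekaDate CheckLeapYear
  simp only []
  rw [dekCore]

-- ===== VERDICT (by name: the statement is the Claim_ definition above) =====
theorem Dek2Greg_spec : Claim_equal_Dek2Greg := by
  intro dekDay dekMonth dekYear _
  unfold Spec_Dek2Greg
  exact Dek2Greg_eq_alt dekDay dekMonth dekYear
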